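-- pv_equiv track=rewrite | github.com/ysjzy123/GrokSearch | src/grok_search/server.py | _allocate_query_budgets
-- ===== SOURCE A (Python) =====
-- def _allocate_query_budgets(total: int, query_count: int) -> list[int]:
--     if total <= 0 or query_count <= 0:
--         return [0] * max(query_count, 0)
--
--     active_queries = min(query_count, total)
--     budgets = [0] * query_count
--     base_share, remainder = divmod(total, active_queries)
--     for index in range(active_queries):
--         budgets[index] = base_share + (1 if index < remainder else 0)
--     return budgets
-- ===== SOURCE B (Python) =====
-- def _allocate_query_budgets(total: int, query_count: int) -> list[int]:
--     if total <= 0 or query_count <= 0: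
--         return [0] * max(query_count, 0)
--
--     budgets = []
--     remaining = total
--     slots = min(query_count, total)
--     while slots > 0:
--         share = -(-remaining // slots)   # ceil(remaining / slots)
--         budgets.append(share)
--         remaining -= share
--         slots -= 1
--     return budgets + [0] * (query_count - min(query_count, total))
-- ===== Notes on version B (the rewrite author's own statement) =====
-- stated objective: alternative
-- what changed: Replaces A's divmod-plus-remainder indexed writes into a preallocated list by a greedy ceiling loop: each step appends ceil(remaining/slots) and subtracts it from the remaining total; no divmod, no remainder counter, no index arithmetic.
import Mathlib
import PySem

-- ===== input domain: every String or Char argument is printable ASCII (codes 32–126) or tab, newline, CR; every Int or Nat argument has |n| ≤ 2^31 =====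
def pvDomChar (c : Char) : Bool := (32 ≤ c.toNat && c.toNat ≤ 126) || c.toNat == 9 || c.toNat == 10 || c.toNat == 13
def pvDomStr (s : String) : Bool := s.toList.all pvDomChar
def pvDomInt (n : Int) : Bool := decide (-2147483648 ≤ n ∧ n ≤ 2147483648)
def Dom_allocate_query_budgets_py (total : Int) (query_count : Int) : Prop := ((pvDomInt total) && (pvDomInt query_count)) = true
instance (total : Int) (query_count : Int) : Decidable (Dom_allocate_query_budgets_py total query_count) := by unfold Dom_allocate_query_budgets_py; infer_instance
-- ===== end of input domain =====

-- B replaces A's divmod-plus-remainder indexed writes by a greedy ceiling loop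
-- (each step appends ceil(remaining/slots) and subtracts it); objective: alternative, same O(query_count) cost.

-- ===== PORT A =====
def allocate_query_budgets_py (total : Int) (query_count : Int) : List Int :=
  if total ≤ 0 ∨ query_count ≤ 0 then
    List.replicate (max query_count 0).toNat 0
  else
    let active_queries := min query_count total
    let budgets := List.replicate query_count.toNat 0
    let base_share := PySem.Int.floordiv total active_queries
    let remainder := PySem.Int.mod total active_queries
    (PySem.List.pyRange 0 active_queries 1).foldl
      (fun b index => PySem.List.pySetD b index (base_share + (if index < remainder then 1 else 0)))
      budgets

-- ===== PORT B =====
-- Source B's while loop: slots counts down to 0, each step appending ceil(remaining/slots) and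
-- subtracting it from remaining; the loop counter is the structural Nat recursion variable,
-- the appends become the cons of each step's share onto the rest of the loop's output.
def pvSpread : Int → Nat → List Int
  | _, 0 => []
  | remaining, s + 1 =>
    let share := -(PySem.Int.floordiv (-remaining) ((s : Int) + 1))
    share :: pvSpread (remaining - share) s

def allocate_query_budgets_py_alt (total : Int) (query_count : Int) : List Int :=
  if total ≤ 0 ∨ query_count ≤ 0 then
    List.replicate (max query_count 0).toNat 0
  else
    let active := min query_count total
    pvSpread total active.toNat ++ List.replicate (query_count - active).toNat 0

-- ===== PRECONDITION & SPEC =====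
def Spec_allocate_query_budgets_py (total : Int) (query_count : Int) (out : List Int) : Prop := out = allocate_query_budgets_py_alt total query_count
instance (total : Int) (query_count : Int) (out : List Int) : Decidable (Spec_allocate_query_budgets_py total query_count out) := by unfold Spec_allocate_query_budgets_py; infer_instance

-- ===== CLAIM (what is proved, stated in full; the proofs are below) =====
def Claim_equal_allocate_query_budgets_py : Prop := ∀ (total : Int) (query_count : Int), Dom_allocate_query_budgets_py total query_count → Spec_allocate_query_budgets_py total query_count (allocate_query_budgets_py total query_count)

-- ===== LEMMAS AND PROOFS =====

lemma foldl_set_range (g : Nat → Int) (l : List Int) (m : Nat) (h : m ≤ l.length) :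
    (List.range m).foldl (fun b j => b.set j (g j)) l = (List.range m).map g ++ l.drop m := by
  induction m with
  | zero => simp
  | succ n ih =>
    rw [List.range_succ, List.foldl_append, List.map_append, ih (by omega)]
    have hlen : ((List.map g (List.range n)).length) = n := by simp
    rw [List.foldl_cons, List.foldl_nil, List.set_append_right _ _ (by omega)]
    have hd : List.drop n l = l[n] :: List.drop (n + 1) l :=
      List.drop_eq_getElem_cons (by omega)
    rw [List.append_assoc]
    congr 1
    rw [hlen, Nat.sub_self, hd, List.set_cons_zero, List.map_singleton, List.singleton_append]

lemma map_range_ite (base r : Int) (m : Nat) (hr0 : 0 ≤ r) (hrm : r ≤ (m : Int)) :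
    (List.range m).map (fun (j : Nat) => base + if (j : Int) < r then 1 else 0)
      = List.replicate r.toNat (base + 1) ++ List.replicate (m - r.toNat) base := by
  apply List.ext_getElem
  · simp; omega
  · intro i h1 h2
    have hi : i < m := by simpa using h1
    rw [List.getElem_map, List.getElem_range]
    by_cases hc : i < r.toNat
    · rw [List.getElem_append_left (by simp; omega), List.getElem_replicate, if_pos (by omega)]
    · rw [List.getElem_append_right (by simp; omega), List.getElem_replicate, if_neg (by omega)]
      simp

-- A's loop produces the three-block form: first (total mod a) slots get base+1, the rest base, tail zeros.
lemma alloc_core (base r a qc : Int) (ha1 : 1 ≤ a) (haq : a ≤ qc) (hr0 : 0 ≤ r) (hra : r < a) :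
    (PySem.List.pyRange 0 a 1).foldl
      (fun b index => PySem.List.pySetD b index (base + if index < r then 1 else 0))
      (List.replicate qc.toNat 0)
    = List.replicate r.toNat (base + 1) ++ List.replicate (a - r).toNat base
      ++ List.replicate (qc - a).toNat 0 := by
  rw [PySem.List.pyRange_one, show a - 0 = a by ring, List.foldl_map]
  have hstep :
      (fun (b : List Int) (k : Nat) =>
          PySem.List.pySetD b ((0 : Int) + (k : Int)) (base + if (0 : Int) + (k : Int) < r then 1 else 0))
        = fun (b : List Int) (k : Nat) => b.set k (base + if (k : Int) < r then 1 else 0) := by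
    funext b k
    simp
  rw [hstep, foldl_set_range _ _ _ (by simp; omega),
      map_range_ite base r a.toNat hr0 (by omega), List.drop_replicate,
      show (a - r).toNat = a.toNat - r.toNat by omega,
      show (qc - a).toNat = qc.toNat - a.toNat by omega, List.append_assoc]

-- The greedy ceiling recursion produces the same three-block head: replicate (T%n) (T/n + 1) ++ replicate (n - T%n) (T/n).
lemma spread_eq (n : Nat) : ∀ T : Int, 0 < n →
    pvSpread T n
      = List.replicate (T % (n : Int)).toNat (T / (n : Int) + 1)
          ++ List.replicate (n - (T % (n : Int)).toNat) (T / (n : Int)) := by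
  induction n with
  | zero => intro T h; omega
  | succ s ih =>
    intro T _
    push_cast
    have hn : (0 : Int) < (s : Int) + 1 := by positivity
    have hq := Int.mul_ediv_add_emod T ((s : Int) + 1)
    have hr0 : 0 ≤ T % ((s : Int) + 1) := Int.emod_nonneg T (by omega)
    have hrn : T % ((s : Int) + 1) < (s : Int) + 1 := Int.emod_lt_of_pos T hn
    set q := T / ((s : Int) + 1) with hqdef
    set r := T % ((s : Int) + 1) with hrdef
    have hshare : -(PySem.Int.floordiv (-T) ((s : Int) + 1)) = q + (if r = 0 then 0 else 1) := by
      rw [PySem.Int.floordiv_eq_ediv_of_pos hn]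
      by_cases h0 : r = 0
      · have hu := (Int.ediv_emod_unique (a := -T) (b := (s : Int) + 1) (r := 0) (q := -q)
          hn).mpr ⟨by linear_combination -hq + h0, by omega, by omega⟩
        simp [h0, hu.1]
      · have hu := (Int.ediv_emod_unique (a := -T) (b := (s : Int) + 1) (r := ((s : Int) + 1) - r) (q := -q - 1)
          hn).mpr ⟨by linear_combination -hq, by omega, by omega⟩
        rw [hu.1]; simp [h0]; ring
    simp only [pvSpread]
    rw [hshare]
    rcases Nat.eq_zero_or_pos s with hs0 | hspos
    · -- one slot left: the share is the whole remaining total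
      subst hs0
      have hr0' : r = 0 := by omega
      have hq' : q = T := by omega
      simp [hr0', hq', pvSpread]
    · -- recurse: T' = T - share has quotient q and remainder (r - 1 if r > 0 else 0) w.r.t. s
      have hsI : (0 : Int) < (s : Int) := by exact_mod_cast hspos
      by_cases h0 : r = 0
      · have hdiv := (Int.ediv_emod_unique (a := T - (q + 0)) (b := (s : Int)) (r := 0) (q := q)
          hsI).mpr ⟨by linear_combination hq - h0, by omega, by omega⟩
        rw [if_pos h0, ih (T - (q + 0)) hspos, hdiv.1, hdiv.2]
        have hrt : r.toNat = 0 := by omega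
        simp [hrt, List.replicate_succ]
      · have hdiv := (Int.ediv_emod_unique (a := T - (q + 1)) (b := (s : Int)) (r := r - 1) (q := q)
          hsI).mpr ⟨by linear_combination hq, by omega, by omega⟩
        rw [if_neg h0, ih (T - (q + 1)) hspos, hdiv.1, hdiv.2]
        have h1 : r.toNat = (r - 1).toNat + 1 := by omega
        have h2 : s - (r - 1).toNat = s + 1 - r.toNat := by omega
        rw [h1, List.replicate_succ, List.cons_append]
        congr 3
        omega

theorem allocate_query_budgets_py_eq (total query_count : Int) :
    allocate_query_budgets_py total query_count = allocate_query_budgets_py_alt total query_count := by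
  unfold allocate_query_budgets_py allocate_query_budgets_py_alt
  dsimp only
  split_ifs with hguard
  · rfl
  · have hpos : (0 : Int) < min query_count total := by omega
    set a := min query_count total with ha
    have hcast : ((a.toNat : Int)) = a := by omega
    have hmod : PySem.Int.mod total a = total % a := PySem.Int.mod_eq_emod_of_pos hpos
    have hdiv : PySem.Int.floordiv total a = total / a := PySem.Int.floordiv_eq_ediv_of_pos hpos
    have hr0 : 0 ≤ total % a := Int.emod_nonneg total (by omega)
    have hra : total % a < a := Int.emod_lt_of_pos total hpos
    rw [spread_eq a.toNat total (by omega), hcast, hmod, hdiv,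
        alloc_core (total / a) (total % a) a query_count (by omega) (by omega) hr0 hra,
        show (a - total % a).toNat = a.toNat - (total % a).toNat by omega, List.append_assoc]

-- ===== VERDICT (by name: the statement is the Claim_ definition above) =====
theorem allocate_query_budgets_py_spec : Claim_equal_allocate_query_budgets_py := by
  intro total query_count _
  unfold Spec_allocate_query_budgets_py
  exact allocate_query_budgets_py_eq total query_count
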